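-- pv_equiv track=rewrite | github.com/Haijuan0814/LeecodePython | Algorithm/DFS/2925. Maximum Score After Applying Operations on a Tree.py | maximumScoreAfterOperations
-- ===== SOURCE A (Python) =====
-- from typing import List
--
-- from collections import defaultdict
--
-- def maximumScoreAfterOperations(edges: List[List[int]], values: List[int]) -> int:
--
--     def dfs(index : int, preIndex = -1 , minScore = 0) -> int :
--
--         if index and graph[index] == [preIndex]:
--             return values[index]
--
--         for nextIndex in graph[index]:
--             if nextIndex != preIndex:
--                 minScore += dfs(nextIndex , index)
--
--         return min(minScore , values[index])
--
--
--     graph = defaultdict(list)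
--     for a,b in edges:
--         graph[a].append(b)
--         graph[b].append(a)
--
--     return sum(values) - dfs(0)
-- ===== SOURCE B (Python) =====
-- from typing import List
--
-- from collections import defaultdict
--
-- def maximumScoreAfterOperations(edges: List[List[int]], values: List[int]) -> int:
--     graph = defaultdict(list)
--     for a, b in edges:
--         graph[a].append(b)
--         graph[b].append(a)
--
--     # iterative post-order: an explicit frame stack plus a value stack, no recursion
--     stack = [(0, -1, None)]   # (node, parent, None = expand | k = combine k child results)
--     results = []
--     while stack:
--         node, parent, pending = stack.pop()
--         if pending is not None:
--             s = sum(results[len(results) - pending:])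
--             del results[len(results) - pending:]
--             results.append(min(s, values[node]))
--             continue
--         adj = graph[node]
--         if node and adj == [parent]:
--             results.append(values[node])
--             continue
--         children = [v for v in adj if v != parent]
--         stack.append((node, parent, len(children)))
--         for v in reversed(children):
--             stack.append((v, node, None))
--     return sum(values) - results[0]
-- ===== Notes on version B (the rewrite author's own statement) =====
-- stated objective: alternative
-- what changed: The recursive DFS is replaced by an explicit iterative post-order traversal: a frame stack (expand/combine frames) plus a value stack compute the same loss DP without recursion, so B is immune to Python's recursion depth limit.
import Mathlib
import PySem

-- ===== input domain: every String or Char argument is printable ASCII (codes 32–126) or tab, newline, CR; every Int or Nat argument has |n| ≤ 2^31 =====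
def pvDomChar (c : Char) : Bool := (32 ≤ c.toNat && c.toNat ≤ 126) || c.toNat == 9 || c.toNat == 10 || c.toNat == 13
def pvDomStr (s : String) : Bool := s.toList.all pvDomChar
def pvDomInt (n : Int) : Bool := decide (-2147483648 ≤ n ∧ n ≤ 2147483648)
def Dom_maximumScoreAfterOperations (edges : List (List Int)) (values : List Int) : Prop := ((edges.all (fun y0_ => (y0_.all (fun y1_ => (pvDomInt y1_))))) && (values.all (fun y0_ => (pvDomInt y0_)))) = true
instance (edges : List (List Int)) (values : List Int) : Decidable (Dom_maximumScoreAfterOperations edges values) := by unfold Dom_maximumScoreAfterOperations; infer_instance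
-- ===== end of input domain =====

-- B replaces A's recursive DFS by an explicit iterative post-order (frame stack + value stack):
-- same DP, different decomposition (objective: alternative; return value only, no mutation).
-- Note: on very deep trees Python A raises RecursionError while iterative B still returns; this
-- depth limit of the CPython interpreter is not modelled here.

-- ===== PORT A =====
-- shared graph building: 'graph = defaultdict(list); for a,b in edges: graph[a].append(b); graph[b].append(a)'
def buildStep (g : PySem.Dict Int (List Int)) (e : List Int) : PySem.Dict Int (List Int) :=
  match e with
  | [a, b] => (g.modify a [] (· ++ [b])).modify b [] (· ++ [a])
  | _ => g

def buildGraph (edges : List (List Int)) : PySem.Dict Int (List Int) :=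
  edges.foldl buildStep PySem.Dict.empty

-- 'def dfs(index, preIndex=-1, minScore=0)'; fuel (first Nat argument) only makes the
-- unbounded Python recursion a Lean function: on inputs satisfying Pre_ (where the Python
-- recursion terminates) the nesting depth is below 8*len(values)+8, so the fuel never runs out.
def dfsA (g : PySem.Dict Int (List Int)) (values : List Int) : Nat → Int → Int → Int
  | 0, _, _ => 0
  | f + 1, index, preIndex =>
    if index ≠ 0 ∧ g.getD index [] = [preIndex] then
      (PySem.List.pyGet? values index).getD 0
    else
      let minScore := (g.getD index []).foldl
        (fun acc v => if v ≠ preIndex then acc + dfsA g values f v index else acc) 0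
      min minScore ((PySem.List.pyGet? values index).getD 0)

def maximumScoreAfterOperations (edges : List (List Int)) (values : List Int) : Int :=
  let graph := buildGraph edges
  values.sum - dfsA graph values (8 * values.length + 8) 0 (-1)

-- ===== PORT B =====
-- the explicit-stack machine of Source B: frames are (fuel, node, parent, pending) where pending =
-- none means 'expand this node' and pending = some k means 'combine the top k child results';
-- 'res' is the Python 'results' list with its top at the head.  Two fuels only make the
-- unbounded Python 'while' loop a total Lean function (the step counter bounds the number of
-- loop iterations, the per-frame fuel mirrors port A's recursion fuel); on inputs satisfying
-- Pre_ neither ever runs out.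
def machineB (g : PySem.Dict Int (List Int)) (values : List Int) :
    Nat → List (Nat × Int × Int × Option Nat) → List Int → List Int
  | 0, _, res => res
  | _ + 1, [], res => res
  | s + 1, (f, node, parent, pend) :: st, res =>
    match pend with
    | some k =>
      let acc := (res.take k).foldl (· + ·) 0
      machineB g values s st (min acc ((PySem.List.pyGet? values node).getD 0) :: res.drop k)
    | none =>
      match f with
      | 0 => machineB g values s st (0 :: res)
      | f' + 1 =>
        let adj := g.getD node []
        if node ≠ 0 ∧ adj = [parent] then
          machineB g values s st (((PySem.List.pyGet? values node).getD 0) :: res)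
        else
          let children := adj.filter (fun v => v ≠ parent)
          machineB g values s
            (children.map (fun v => (f', v, node, (none : Option Nat)))
              ++ (f' + 1, node, parent, some children.length) :: st) res

def maximumScoreAfterOperations_alt (edges : List (List Int)) (values : List Int) : Int :=
  let graph := buildGraph edges
  let res := machineB graph values ((2 * edges.length + 2) ^ (8 * values.length + 9))
    [(8 * values.length + 8, 0, -1, none)] []
  values.sum - res.headD 0

-- ===== PRECONDITION & SPEC =====
-- helpers for Pre_: the simple (deduplicated, loop-free, normalised) edges, the self-loop
-- labels, component computation, and a union-find style forest test.
def normPairs (edges : List (List Int)) : List (Int × Int) :=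
  (edges.filterMap (fun e => match e with
    | [a, b] => if a = b then none else some (if a ≤ b then (a, b) else (b, a))
    | _ => none)).dedup

def selfLabels (edges : List (List Int)) : List Int :=
  (edges.filterMap (fun e => match e with
    | [a, b] => if a = b then some a else none
    | _ => none)).dedup

def compStep (pairs : List (Int × Int)) (S : List Int) : List Int :=
  pairs.foldl (fun S p =>
    if p.1 ∈ S ∧ p.2 ∉ S then S ++ [p.2]
    else if p.2 ∈ S ∧ p.1 ∉ S then S ++ [p.1]
    else S) S

-- component of node 0
def compOf (pairs : List (Int × Int)) : List Int :=
  (compStep pairs)^[pairs.length + 1] [0]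

def addForestEdge (comps : List (List Int)) (a b : Int) : Option (List (List Int)) :=
  if a = b then none
  else
    let ca := ((comps.find? (fun c => decide (a ∈ c))).getD [a])
    if b ∈ ca then none
    else
      let cb := ((comps.find? (fun c => decide (b ∈ c))).getD [b])
      some ((ca ++ cb) :: comps.filter (fun c => decide (a ∉ c) && decide (b ∉ c)))

def isForest (pairs : List (Int × Int)) : Bool :=
  (pairs.foldl (fun st p => st.bind (fun comps => addForestEdge comps p.1 p.2)) (some [])).isSome

-- the set of nodes Python A's dfs actually visits, the simple edges among them, and a flag for
-- the root-sentinel condition: dfs(0, preIndex=-1) skips a direct 0–(-1) edge, so the part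
-- behind it is visited only if a self-loop in 0's component makes the walk re-enter node 0 with
-- a parent other than -1; and if -1 is otherwise reachable the walk re-expands dfs(0,-1) forever.
def visitInfo (edges : List (List Int)) : List Int × List (Int × Int) × Bool :=
  let pairs := normPairs edges
  let selfs := selfLabels edges
  let e0 : Bool := decide ((-1, 0) ∈ pairs)
  let p0 := pairs.filter (fun p => p ≠ (-1, 0))
  let C0 := compOf p0
  if e0 ∧ selfs.any (fun s => decide (s ∈ C0)) then
    let V := compOf pairs
    (V, pairs.filter (fun p => decide (p.1 ∈ V)), true)
  else
    (C0, p0.filter (fun p => decide (p.1 ∈ C0)), !(e0 && decide ((-1 : Int) ∈ C0)))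

-- Pre_ is EXACTLY the region where Python A returns (nothing A returns on is excluded): every
-- edge is a pair (else ValueError on unpacking), every visited label is a valid Python index
-- into values (else IndexError), and the subgraph the dfs actually walks — computed by
-- visitInfo, including the preIndex=-1 root-sentinel cases — has no cycle of two or more nodes
-- and at most one self-loop; otherwise the parent-skip walk recurses forever (RecursionError).
def Pre_maximumScoreAfterOperations (edges : List (List Int)) (values : List Int) : Prop :=
  values ≠ [] ∧
  (∀ e ∈ edges, e.length = 2) ∧
  (visitInfo edges).2.2 = true ∧
  (∀ x ∈ (visitInfo edges).1, -(values.length : Int) ≤ x ∧ x < (values.length : Int)) ∧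
  isForest (visitInfo edges).2.1 = true ∧
  ((selfLabels edges).filter (fun s => decide (s ∈ (visitInfo edges).1))).length ≤ 1
instance (edges : List (List Int)) (values : List Int) : Decidable (Pre_maximumScoreAfterOperations edges values) := by unfold Pre_maximumScoreAfterOperations; infer_instance

def pvWitness_maximumScoreAfterOperations : List (List Int) × List Int :=
  ([[0, 1], [1, 2]], [2, 3, 4])

def Spec_maximumScoreAfterOperations (edges : List (List Int)) (values : List Int) (out : Int) : Prop := out = maximumScoreAfterOperations_alt edges values
instance (edges : List (List Int)) (values : List Int) (out : Int) : Decidable (Spec_maximumScoreAfterOperations edges values out) := by unfold Spec_maximumScoreAfterOperations; infer_instance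

-- ===== CLAIM (what is proved, stated in full; the proofs are below) =====
def Claim_equal_maximumScoreAfterOperations : Prop := ∀ (edges : List (List Int)) (values : List Int), Dom_maximumScoreAfterOperations edges values → Pre_maximumScoreAfterOperations edges values → Spec_maximumScoreAfterOperations edges values (maximumScoreAfterOperations edges values)

-- ===== LEMMAS AND PROOFS =====

-- adjacency lists of the built graph are short: at most 2 * len(edges) entries
theorem getD_buildStep_len (d : PySem.Dict Int (List Int)) (e : List Int) (u : Int) :
    ((buildStep d e).getD u []).length ≤ (d.getD u []).length + 2 := by
  cases e with
  | nil => simp [buildStep]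
  | cons a t =>
    cases t with
    | nil => simp [buildStep]
    | cons b t2 =>
      cases t2 with
      | nil =>
        simp only [buildStep, PySem.Dict.getD_modify]
        split_ifs <;> simp_all
      | cons c t3 => simp [buildStep]

theorem getD_buildGraph_foldl_len (edges : List (List Int)) (u : Int) :
    ∀ d : PySem.Dict Int (List Int),
      ((edges.foldl buildStep d).getD u []).length ≤ (d.getD u []).length + 2 * edges.length := by
  induction edges with
  | nil => intro d; simp
  | cons e rest ih =>
    intro d
    simp only [List.foldl_cons, List.length_cons]
    have := getD_buildStep_len d e u
    have := ih (buildStep d e)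
    omega

theorem getD_buildGraph_len (edges : List (List Int)) (u : Int) :
    (((buildGraph edges).getD u []).length) ≤ 2 * edges.length := by
  have := getD_buildGraph_foldl_len edges u PySem.Dict.empty
  simpa [buildGraph] using this

-- weight of a machine frame: an upper bound on the number of machine steps it can cause
def frameWt (B : Nat) (fr : Nat × Int × Int × Option Nat) : Nat :=
  match fr.2.2.2 with
  | some _ => 1
  | none => (B + 2) ^ (fr.1 + 1)

theorem frameWt_pos (B : Nat) (fr : Nat × Int × Int × Option Nat) : 1 ≤ frameWt B fr := by
  unfold frameWt
  split
  · omega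
  · exact Nat.one_le_pow _ _ (by omega)

theorem machineB_dec4 (B f' k : Nat) (hk : k ≤ B) :
    k * (B + 2) ^ (f' + 1) + 1 < (B + 2) ^ (f' + 1 + 1) := by
  have hx : 1 ≤ (B + 2) ^ (f' + 1) := Nat.one_le_pow _ _ (by omega)
  have h3 : k * (B + 2) ^ (f' + 1) ≤ B * (B + 2) ^ (f' + 1) := Nat.mul_le_mul_right _ hk
  have h2 : (B + 2) ^ (f' + 1 + 1) = (B + 2) ^ (f' + 1) * (B + 2) := pow_succ _ _
  nlinarith

-- expanding a frame strictly decreases the total stack weight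
theorem machineB_dec (B f' : Nat) (node parent : Int) (adj : List Int) (hk : adj.length ≤ B)
    (st : List (Nat × Int × Int × Option Nat)) :
    ((((adj.filter (fun v => v ≠ parent)).map (fun v => (f', v, node, (none : Option Nat))))
        ++ ((f' + 1, node, parent, some ((adj.filter (fun v => v ≠ parent)).length)) :: st)).map
        (frameWt B)).sum
      < (((f' + 1, node, parent, (none : Option Nat)) :: st).map (frameWt B)).sum := by
  simp only [List.map_append, List.sum_append, List.map_cons, List.sum_cons, List.map_map]
  rw [show ((frameWt B) ∘ fun v : Int => (f', v, node, (none : Option Nat)))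
      = fun _ => (B + 2) ^ (f' + 1) from rfl]
  rw [List.map_const', List.sum_replicate, smul_eq_mul]
  simp only [frameWt]
  have hk2 : (adj.filter (fun v => v ≠ parent)).length ≤ B :=
    le_trans (List.length_filter_le _ _) hk
  have := machineB_dec4 B f' (adj.filter (fun v => v ≠ parent)).length hk2
  omega

-- fold helpers for the machine/dfs correspondence
theorem foldl_add_shift (l : List Int) : ∀ a : Int, l.foldl (· + ·) a = a + l.foldl (· + ·) 0 := by
  induction l with
  | nil => simp
  | cons y ys ih => intro a; simp only [List.foldl_cons]; rw [ih, ih (0 + y)]; ring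

-- A's accumulation loop as a fold over the filtered adjacency list
theorem foldl_if_add_eq (p : Int) (h : Int → Int) :
    ∀ (adj : List Int) (acc : Int),
      adj.foldl (fun acc v => if v ≠ p then acc + h v else acc) acc
        = acc + (((adj.filter (fun v => v ≠ p)).map h).foldl (· + ·) 0) := by
  intro adj
  induction adj with
  | nil => intro acc; simp
  | cons x xs ih =>
    intro acc
    by_cases hx : x = p
    · rw [List.foldl_cons, if_neg (by simp [hx]), ih, List.filter_cons,
        if_neg (by simp [hx])]
    · rw [List.foldl_cons, if_pos hx, ih, List.filter_cons, if_pos (by simp [hx]),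
        List.map_cons, List.foldl_cons, foldl_add_shift _ (0 + h x)]
      ring

theorem foldl_add_reverse (l : List Int) : l.reverse.foldl (· + ·) 0 = l.foldl (· + ·) 0 := by
  induction l with
  | nil => rfl
  | cons x xs ih =>
    simp only [List.reverse_cons, List.foldl_append, List.foldl_cons, List.foldl_nil]
    rw [ih, foldl_add_shift xs (0 + x)]
    ring

-- with enough step fuel the machine's result does not depend on the exact amount
theorem machineB_indep (g : PySem.Dict Int (List Int)) (values : List Int) (B : Nat)
    (hb : ∀ u : Int, ((g.getD u []).length ≤ B)) :
    ∀ (s₁ : Nat) (st : List (Nat × Int × Int × Option Nat)) (res : List Int) (s₂ : Nat),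
      (st.map (frameWt B)).sum ≤ s₁ → (st.map (frameWt B)).sum ≤ s₂ →
      machineB g values s₁ st res = machineB g values s₂ st res := by
  intro s₁
  induction s₁ with
  | zero =>
    intro st res s₂ h1 _
    cases st with
    | nil => cases s₂ <;> simp [machineB]
    | cons fr st' =>
      exfalso
      have := frameWt_pos B fr
      simp only [List.map_cons, List.sum_cons] at h1
      omega
  | succ a ih =>
    intro st res s₂ h1 h2
    cases st with
    | nil => cases s₂ <;> simp [machineB]
    | cons fr st' =>
      obtain ⟨f, node, parent, pend⟩ := fr
      have hw := frameWt_pos B (f, node, parent, pend)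
      simp only [List.map_cons, List.sum_cons] at h1 h2
      obtain ⟨b, rfl⟩ : ∃ b, s₂ = b + 1 := by
        cases s₂ with
        | zero => exfalso; omega
        | succ b => exact ⟨b, rfl⟩
      match pend with
      | some k =>
        rw [machineB, machineB]
        exact ih st' _ b (by simp only [frameWt] at h1; omega)
          (by simp only [frameWt] at h2; omega)
      | none =>
        match f with
        | 0 =>
          rw [machineB, machineB]
          exact ih st' _ b (by omega) (by omega)
        | f' + 1 =>
          rw [machineB, machineB]
          by_cases hleaf : node ≠ 0 ∧ g.getD node [] = [parent]
          · simp only [if_pos hleaf]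
            exact ih st' _ b (by omega) (by omega)
          · simp only [if_neg hleaf]
            have hd := machineB_dec B f' node parent (g.getD node []) (hb node) st'
            simp only [List.map_cons, List.sum_cons] at hd
            have hfw : frameWt B (f' + 1, node, parent, (none : Option Nat))
                = (B + 2) ^ (f' + 1 + 1) := rfl
            exact ih _ _ b (by omega) (by omega)

-- the machine evaluates an 'expand' frame to exactly the recursive dfs value
theorem machineB_sim (g : PySem.Dict Int (List Int)) (values : List Int) (B : Nat)
    (hb : ∀ u : Int, ((g.getD u []).length ≤ B)) :
    ∀ (f : Nat) (u p : Int) (st : List (Nat × Int × Int × Option Nat)) (res : List Int) (s : Nat),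
      ((((f, u, p, (none : Option Nat)) :: st).map (frameWt B)).sum ≤ s) →
      machineB g values s ((f, u, p, none) :: st) res
        = machineB g values ((st.map (frameWt B)).sum) st (dfsA g values f u p :: res) := by
  intro f
  induction f with
  | zero =>
    intro u p st res s hs
    simp only [List.map_cons, List.sum_cons] at hs
    have hw : frameWt B (0, u, p, (none : Option Nat)) = (B + 2) ^ 1 := rfl
    obtain ⟨a, rfl⟩ : ∃ a, s = a + 1 := by
      cases s with
      | zero => exfalso; rw [hw] at hs; have := Nat.one_le_pow 1 (B + 2) (by omega); omega
      | succ a => exact ⟨a, rfl⟩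
    rw [machineB]
    have : dfsA g values 0 u p = 0 := rfl
    rw [this]
    exact machineB_indep g values B hb a st _ _
      (by rw [hw] at hs; have := Nat.one_le_pow 1 (B + 2) (by omega); omega) le_rfl
  | succ f ih =>
    intro u p st res s hs
    simp only [List.map_cons, List.sum_cons] at hs
    have hw : frameWt B (f + 1, u, p, (none : Option Nat)) = (B + 2) ^ (f + 1 + 1) := rfl
    have hpow : 1 ≤ (B + 2) ^ (f + 1 + 1) := Nat.one_le_pow _ _ (by omega)
    obtain ⟨a, rfl⟩ : ∃ a, s = a + 1 := by
      cases s with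
      | zero => exfalso; rw [hw] at hs; omega
      | succ a => exact ⟨a, rfl⟩
    rw [machineB]
    by_cases hleaf : u ≠ 0 ∧ g.getD u [] = [p]
    · simp only [if_pos hleaf]
      have hd : dfsA g values (f + 1) u p = (PySem.List.pyGet? values u).getD 0 := by
        rw [dfsA.eq_def]
        simp [hleaf]
      rw [hd]
      exact machineB_indep g values B hb a st _ _ (by rw [hw] at hs; omega) le_rfl
    · simp only [if_neg hleaf]
      have hd : dfsA g values (f + 1) u p
          = min ((((g.getD u []).filter (fun v => v ≠ p)).map
              (fun v => dfsA g values f v u)).foldl (· + ·) 0)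
            ((PySem.List.pyGet? values u).getD 0) := by
        rw [dfsA.eq_def]
        simp only [if_neg hleaf]
        rw [foldl_if_add_eq p (fun v => dfsA g values f v u) (g.getD u []) 0]
        simp
      -- evaluate the child frames one by one
      have hchildren : ∀ (cs : List Int) (st' : List (Nat × Int × Int × Option Nat))
          (res' : List Int) (s' : Nat),
          (((cs.map (fun v => (f, v, u, (none : Option Nat)))) ++ st').map (frameWt B)).sum ≤ s' →
          machineB g values s' ((cs.map (fun v => (f, v, u, (none : Option Nat)))) ++ st') res'
            = machineB g values ((st'.map (frameWt B)).sum) st'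
                ((cs.map (fun v => dfsA g values f v u)).reverse ++ res') := by
        intro cs
        induction cs with
        | nil =>
          intro st' res' s' hs'
          simp only [List.map_nil, List.nil_append] at hs' ⊢
          simp only [List.reverse_nil, List.nil_append]
          exact machineB_indep g values B hb s' st' res' _ hs' le_rfl
        | cons c ct ihc =>
          intro st' res' s' hs'
          simp only [List.map_cons, List.cons_append] at hs' ⊢
          rw [ih c u _ res' s' (by simpa using hs')]
          rw [ihc st' (dfsA g values f c u :: res') _ le_rfl]
          simp
      set cs := (g.getD u []).filter (fun v => v ≠ p) with hcs
      have hdec := machineB_dec B f u p (g.getD u []) (hb u) st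
      rw [hchildren cs ((f + 1, u, p, some cs.length) :: st) res a
        (by rw [← hcs] at hdec; simp only [List.map_cons, List.sum_cons] at hdec ⊢
            rw [hw] at hs; omega)]
      have hcomb : ((((f + 1, u, p, some cs.length) :: st)).map (frameWt B)).sum
          = (st.map (frameWt B)).sum + 1 := by
        simp only [List.map_cons, List.sum_cons, frameWt]
        omega
      rw [hcomb, machineB]
      have hlen : ((cs.map (fun v => dfsA g values f v u)).reverse).length = cs.length := by simp
      rw [List.take_append_of_le_length (by omega), List.drop_append_of_le_length (by omega)]
      rw [List.take_of_length_le (by omega), List.drop_of_length_le (by omega)]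
      simp only [List.nil_append]
      rw [foldl_add_reverse]
      rw [hd]

-- ===== VERDICT (by name: the statement is the Claim_ definition above) =====
theorem maximumScoreAfterOperations_spec : Claim_equal_maximumScoreAfterOperations := by
  intro edges values _ _
  unfold Spec_maximumScoreAfterOperations
  unfold maximumScoreAfterOperations maximumScoreAfterOperations_alt
  simp only
  rw [machineB_sim (buildGraph edges) values (2 * edges.length) (getD_buildGraph_len edges)
    (8 * values.length + 8) 0 (-1) [] [] ((2 * edges.length + 2) ^ (8 * values.length + 9))
    (by simp only [List.map_cons, List.map_nil, List.sum_cons, List.sum_nil]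
        exact le_of_eq (by simp [frameWt]))]
  simp [machineB]
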